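-- pv_equiv track=rewrite | github.com/Julesc013/dominium | src/control/control_plane_engine.py | _resolve_fidelity
-- ===== SOURCE A (Python) =====
-- from typing import Dict, List, Mapping, Tuple
--
-- DOWNGRADE_BUDGET = "downgrade.budget_insufficient"
--
-- DOWNGRADE_POLICY = "downgrade.policy_disallows"
--
-- _FIDELITY_LEVELS = ("macro", "meso", "micro")
--
-- _FIDELITY_RANK = dict((token, idx) for idx, token in enumerate(_FIDELITY_LEVELS))
--
-- DEFAULT_FIDELITY = "meso"
--
-- def _fidelity_requested(value: object) -> str:
--     token = str(value or "").strip()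
--     if token in _FIDELITY_RANK:
--         return token
--     return DEFAULT_FIDELITY
--
-- def _resolve_fidelity(
--     requested: str,
--     allowed: List[str],
--     policy_context: Mapping[str, object] | None,
-- ) -> Tuple[str, List[str]]:
--     req = _fidelity_requested(requested)
--     rows = [token for token in list(allowed or []) if token in _FIDELITY_RANK]
--     if not rows:
--         rows = list(_FIDELITY_LEVELS)
--     reasons: List[str] = []
--     max_fidelity = str((dict(policy_context or {})).get("max_control_fidelity", "")).strip()
--     if max_fidelity in _FIDELITY_RANK and _FIDELITY_RANK[req] > _FIDELITY_RANK[max_fidelity]: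
--         req = max_fidelity
--         reasons.append(DOWNGRADE_BUDGET)
--     if req in rows:
--         return req, reasons
--     req_rank = _FIDELITY_RANK[req]
--     candidates = sorted(rows, key=lambda token: _FIDELITY_RANK[token], reverse=True)
--     for token in candidates:
--         if _FIDELITY_RANK[token] <= req_rank:
--             reasons.append(DOWNGRADE_POLICY)
--             return token, reasons
--     reasons.append(DOWNGRADE_POLICY)
--     return sorted(rows, key=lambda token: _FIDELITY_RANK[token])[0], reasons
-- ===== SOURCE B (Python) =====
-- from typing import Dict, List, Mapping, Tuple
--
-- DOWNGRADE_BUDGET = "downgrade.budget_insufficient"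
-- DOWNGRADE_POLICY = "downgrade.policy_disallows"
-- _FIDELITY_LEVELS = ("macro", "meso", "micro")
-- _FIDELITY_RANK = dict((token, idx) for idx, token in enumerate(_FIDELITY_LEVELS))
-- DEFAULT_FIDELITY = "meso"
--
--
-- def _resolve_fidelity(requested, allowed, policy_context):
--     token = str(requested or "").strip()
--     req = token if token in _FIDELITY_RANK else DEFAULT_FIDELITY
--     # walk the canonical level tuple instead of filtering/sorting the rows
--     present = [lvl for lvl in _FIDELITY_LEVELS if lvl in (allowed or [])]
--     if not present:
--         present = list(_FIDELITY_LEVELS)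
--     reasons: List[str] = []
--     cap = str(dict(policy_context or {}).get("max_control_fidelity", "")).strip()
--     if cap in _FIDELITY_RANK and _FIDELITY_RANK[cap] < _FIDELITY_RANK[req]:
--         req = cap
--         reasons.append(DOWNGRADE_BUDGET)
--     if req in present:
--         return req, reasons
--     reasons.append(DOWNGRADE_POLICY)
--     r = _FIDELITY_RANK[req]
--     lower = [lvl for lvl in present if _FIDELITY_RANK[lvl] <= r]
--     # present is already in ascending rank order: last of lower is the closest
--     # level below the request, first of present is the overall minimum
--     return (lower[-1] if lower else present[0]), reasons
-- ===== Notes on version B (the rewrite author's own statement) =====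
-- stated objective: simpler
-- what changed: A filters allowed into rows, sorts them twice (descending and ascending by rank) and scans for the first token at or below the requested rank; B instead walks the fixed three-level tuple once, building the present levels in canonical rank order so the fallback is just the last lower level or the first present one, with no sorting or scanning of rows.
import Mathlib
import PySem

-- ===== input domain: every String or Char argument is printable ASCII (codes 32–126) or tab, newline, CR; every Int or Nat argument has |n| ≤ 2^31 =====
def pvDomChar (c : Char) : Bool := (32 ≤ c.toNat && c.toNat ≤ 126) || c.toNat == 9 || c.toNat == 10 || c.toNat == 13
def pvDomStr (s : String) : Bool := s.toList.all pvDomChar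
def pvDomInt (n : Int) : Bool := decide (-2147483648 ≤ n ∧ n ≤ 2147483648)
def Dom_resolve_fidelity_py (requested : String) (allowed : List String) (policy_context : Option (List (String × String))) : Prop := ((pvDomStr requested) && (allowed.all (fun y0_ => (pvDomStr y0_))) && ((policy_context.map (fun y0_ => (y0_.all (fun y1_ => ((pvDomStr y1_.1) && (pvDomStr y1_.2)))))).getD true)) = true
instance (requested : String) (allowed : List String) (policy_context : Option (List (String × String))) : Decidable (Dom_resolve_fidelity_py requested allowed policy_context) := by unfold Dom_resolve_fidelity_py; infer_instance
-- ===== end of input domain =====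

-- B replaces A's filter + two sorts + descending scan by a single walk over the
-- canonical level tuple (objective: simpler).

-- shared module constants: _FIDELITY_LEVELS, and _FIDELITY_RANK as a lookup function
def pvLevels : List String := ["macro", "meso", "micro"]

def pvRank? (t : String) : Option Nat :=
  if t = "macro" then some 0
  else if t = "meso" then some 1
  else if t = "micro" then some 2
  else none

-- ===== PORT A =====
-- _fidelity_requested
def pvFidelityRequested (value : String) : String :=
  let token := PySem.Str.strip value
  if (pvRank? token).isSome then token else "meso"

def resolve_fidelity_py (requested : String) (allowed : List String) (policy_context : Option (List (String × String))) : String × List String :=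
  let req := pvFidelityRequested requested
  let rows := allowed.filter (fun t => (pvRank? t).isSome)
  let rows := if rows = [] then pvLevels else rows
  let max_fidelity := PySem.Str.strip ((PySem.Dict.ofList (policy_context.getD [])).getD "max_control_fidelity" "")
  -- the `if` body assigns req and appends to reasons
  let downgraded := (pvRank? max_fidelity).isSome ∧ (pvRank? req).getD 0 > (pvRank? max_fidelity).getD 0
  let req := if downgraded then max_fidelity else req
  let reasons : List String := if downgraded then ["downgrade.budget_insufficient"] else []
  if req ∈ rows then (req, reasons)
  else
    let req_rank := (pvRank? req).getD 0
    let candidates := PySem.List.sorted rows (fun t => (pvRank? t).getD 0) true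
    -- the for-loop: first token of candidates with rank ≤ req_rank, else fall through
    match candidates.find? (fun t => (pvRank? t).getD 0 ≤ req_rank) with
    | some token => (token, reasons ++ ["downgrade.policy_disallows"])
    | none => ((PySem.List.sorted rows (fun t => (pvRank? t).getD 0) false).headD "", reasons ++ ["downgrade.policy_disallows"])

-- ===== PORT B =====
def resolve_fidelity_py_alt (requested : String) (allowed : List String) (policy_context : Option (List (String × String))) : String × List String :=
  let token := PySem.Str.strip requested
  let req := if (pvRank? token).isSome then token else "meso"
  let present := pvLevels.filter (fun lvl => lvl ∈ allowed)
  let present := if present = [] then pvLevels else present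
  let cap := PySem.Str.strip ((PySem.Dict.ofList (policy_context.getD [])).getD "max_control_fidelity" "")
  let capped := (pvRank? cap).isSome ∧ (pvRank? cap).getD 0 < (pvRank? req).getD 0
  let req := if capped then cap else req
  let reasons : List String := if capped then ["downgrade.budget_insufficient"] else []
  if req ∈ present then (req, reasons)
  else
    let reasons := reasons ++ ["downgrade.policy_disallows"]
    let r := (pvRank? req).getD 0
    let lower := present.filter (fun lvl => (pvRank? lvl).getD 0 ≤ r)
    (match lower.getLast? with
     | some t => t
     | none => present.headD "", reasons)

-- ===== PRECONDITION & SPEC =====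
def Spec_resolve_fidelity_py (requested : String) (allowed : List String) (policy_context : Option (List (String × String))) (out : String × List String) : Prop := out = resolve_fidelity_py_alt requested allowed policy_context
instance (requested : String) (allowed : List String) (policy_context : Option (List (String × String))) (out : String × List String) : Decidable (Spec_resolve_fidelity_py requested allowed policy_context out) := by unfold Spec_resolve_fidelity_py; infer_instance

-- ===== CLAIM (what is proved, stated in full; the proofs are below) =====
def Claim_equal_resolve_fidelity_py : Prop := ∀ (requested : String) (allowed : List String) (policy_context : Option (List (String × String))), Dom_resolve_fidelity_py requested allowed policy_context → Spec_resolve_fidelity_py requested allowed policy_context (resolve_fidelity_py requested allowed policy_context)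

-- ===== LEMMAS AND PROOFS =====
theorem pvRank?_isSome_iff (t : String) : (pvRank? t).isSome ↔ t = "macro" ∨ t = "meso" ∨ t = "micro" := by
  unfold pvRank?; split_ifs <;> simp_all

-- A's fallback scan over the rank-descending sort, characterised by memberships
theorem pv_find_desc (s : List String) (r : Nat)
    (helts : ∀ t ∈ s, t = "macro" ∨ t = "meso" ∨ t = "micro")
    (hp : s.Pairwise (fun a b => (pvRank? b).getD 0 ≤ (pvRank? a).getD 0)) :
    s.find? (fun t => (pvRank? t).getD 0 ≤ r) =
      if 2 ≤ r ∧ "micro" ∈ s then some "micro"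
      else if 1 ≤ r ∧ "meso" ∈ s then some "meso"
      else if "macro" ∈ s then some "macro" else none := by
  induction s with
  | nil => simp
  | cons h t ih =>
    rw [List.pairwise_cons] at hp
    obtain ⟨hht, hpt⟩ := hp
    have iht := ih (fun x hx => helts x (List.mem_cons_of_mem _ hx)) hpt
    rcases helts h (List.mem_cons_self ..) with rfl | rfl | rfl
    · have hme : "meso" ∉ t := fun hm => by have := hht _ hm; simp [pvRank?] at this
      have hmi : "micro" ∉ t := fun hm => by have := hht _ hm; simp [pvRank?] at this
      simp [pvRank?, hme, hmi]
    · have hmi : "micro" ∉ t := fun hm => by have := hht _ hm; simp [pvRank?] at this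
      by_cases hr : 1 ≤ r
      · simp [pvRank?, hmi, hr]
      · have hr0 : r = 0 := by omega
        subst hr0
        simp only [List.find?_cons, pvRank?] at *
        simp_all
    · by_cases hr : 2 ≤ r
      · simp [pvRank?, hr]
      · rw [List.find?_cons_of_neg (by simp [pvRank?]; omega), iht]
        have hr' : ¬ (2 ≤ r) := hr
        simp [List.mem_cons, hr']

-- the head of the rank-ascending sort, characterised by memberships
theorem pv_head_asc (s : List String)
    (hne : s ≠ [])
    (helts : ∀ t ∈ s, t = "macro" ∨ t = "meso" ∨ t = "micro")
    (hp : s.Pairwise (fun a b => (pvRank? a).getD 0 ≤ (pvRank? b).getD 0)) :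
    s.headD "" = if "macro" ∈ s then "macro" else if "meso" ∈ s then "meso" else "micro" := by
  cases s with
  | nil => exact absurd rfl hne
  | cons h t =>
    rw [List.pairwise_cons] at hp
    obtain ⟨hht, _⟩ := hp
    rcases helts h (List.mem_cons_self ..) with rfl | rfl | rfl
    · simp
    · have hma : "macro" ∉ t := fun hm => by have := hht _ hm; simp [pvRank?] at this
      simp [hma]
    · have hma : "macro" ∉ t := fun hm => by have := hht _ hm; simp [pvRank?] at this
      have hme : "meso" ∉ t := fun hm => by have := hht _ hm; simp [pvRank?] at this
      simp [hma, hme]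

-- the tails of the two ports agree for any normalised (possibly capped) request token
theorem pv_tail_eq (q : String) (allowed : List String) (reasons : List String)
    (hq : q = "macro" ∨ q = "meso" ∨ q = "micro") :
    (let rows := allowed.filter (fun t => (pvRank? t).isSome)
     let rows := if rows = [] then pvLevels else rows
     if q ∈ rows then (q, reasons)
     else
       let req_rank := (pvRank? q).getD 0
       let candidates := PySem.List.sorted rows (fun t => (pvRank? t).getD 0) true
       match candidates.find? (fun t => (pvRank? t).getD 0 ≤ req_rank) with
       | some token => (token, reasons ++ ["downgrade.policy_disallows"])
       | none => ((PySem.List.sorted rows (fun t => (pvRank? t).getD 0) false).headD "", reasons ++ ["downgrade.policy_disallows"]))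
    =
    (let present := pvLevels.filter (fun lvl => lvl ∈ allowed)
     let present := if present = [] then pvLevels else present
     if q ∈ present then (q, reasons)
     else
       let reasons := reasons ++ ["downgrade.policy_disallows"]
       let r := (pvRank? q).getD 0
       let lower := present.filter (fun lvl => (pvRank? lvl).getD 0 ≤ r)
       (match lower.getLast? with
        | some t => t
        | none => present.headD "", reasons)) := by
  have hqr : (pvRank? q).isSome := (pvRank?_isSome_iff q).mpr hq
  simp only []
  set rows0 := allowed.filter (fun t => (pvRank? t).isSome) with hrows0
  have hmem : ∀ lvl, (pvRank? lvl).isSome → (lvl ∈ rows0 ↔ lvl ∈ allowed) := by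
    intro lvl h; simp [hrows0, List.mem_filter, h]
  have helts : ∀ t ∈ rows0, t = "macro" ∨ t = "meso" ∨ t = "micro" := by
    intro t ht
    rw [hrows0, List.mem_filter] at ht
    exact (pvRank?_isSome_iff t).mp ht.2
  have hnil : rows0 = [] ↔ ¬("macro" ∈ allowed) ∧ ¬("meso" ∈ allowed) ∧ ¬("micro" ∈ allowed) := by
    constructor
    · intro hn
      refine ⟨fun hm => ?_, fun hm => ?_, fun hm => ?_⟩
      · have : "macro" ∈ rows0 := by rw [hrows0, List.mem_filter]; exact ⟨hm, by simp [pvRank?]⟩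
        rw [hn] at this; simp at this
      · have : "meso" ∈ rows0 := by rw [hrows0, List.mem_filter]; exact ⟨hm, by simp [pvRank?]⟩
        rw [hn] at this; simp at this
      · have : "micro" ∈ rows0 := by rw [hrows0, List.mem_filter]; exact ⟨hm, by simp [pvRank?]⟩
        rw [hn] at this; simp at this
    · rintro ⟨a, b, c⟩
      rw [hrows0, List.filter_eq_nil_iff]
      intro t ht hs
      rcases (pvRank?_isSome_iff t).mp hs with rfl | rfl | rfl <;> contradiction
  by_cases hz : rows0 = []
  · have hpres : pvLevels.filter (fun lvl => lvl ∈ allowed) = [] := by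
      obtain ⟨a, b, c⟩ := hnil.mp hz
      simp [pvLevels, a, b, c]
    rw [hz, hpres]
    have hqL : q ∈ pvLevels := by rcases hq with rfl | rfl | rfl <;> simp [pvLevels]
    simp [hqL]
  · have hpres : ¬ (pvLevels.filter (fun lvl => lvl ∈ allowed) = []) := by
      intro hp
      apply hz; rw [hnil]
      refine ⟨fun hm => ?_, fun hm => ?_, fun hm => ?_⟩
      · have := List.filter_eq_nil_iff.mp hp "macro" (by simp [pvLevels]); simp_all
      · have := List.filter_eq_nil_iff.mp hp "meso" (by simp [pvLevels]); simp_all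
      · have := List.filter_eq_nil_iff.mp hp "micro" (by simp [pvLevels]); simp_all
    rw [if_neg hz, if_neg hpres]
    by_cases hqa : q ∈ allowed
    · rw [if_pos ((hmem q hqr).mpr hqa), if_pos (by rw [List.mem_filter]; exact ⟨by rcases hq with rfl|rfl|rfl <;> simp [pvLevels], by simpa using hqa⟩)]
    · rw [if_neg (fun h => hqa ((hmem q hqr).mp h)),
          if_neg (fun h => hqa (by simpa using (List.mem_filter.mp h).2))]
      rw [pv_find_desc _ _ (fun t ht => helts t ((PySem.List.mem_sorted ..).mp ht))
            (PySem.List.sorted_pairwise_rev ..)]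
      have hms : ∀ lvl, (pvRank? lvl).isSome →
          ((lvl ∈ PySem.List.sorted rows0 (fun t => (pvRank? t).getD 0) true) ↔ lvl ∈ allowed) := by
        intro lvl h; rw [PySem.List.mem_sorted]; exact hmem lvl h
      simp only [hms "micro" (by simp [pvRank?]), hms "meso" (by simp [pvRank?]), hms "macro" (by simp [pvRank?])]
      have hhead := pv_head_asc (PySem.List.sorted rows0 (fun t => (pvRank? t).getD 0) false)
        (by rw [Ne, PySem.List.sorted_eq_nil_iff]; exact hz)
        (fun t ht => helts t ((PySem.List.mem_sorted ..).mp ht))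
        (PySem.List.sorted_pairwise ..)
      simp only [PySem.List.mem_sorted, hmem "macro" (by simp [pvRank?]),
          hmem "meso" (by simp [pvRank?])] at hhead
      by_cases h0 : "macro" ∈ allowed <;> by_cases h1 : "meso" ∈ allowed <;> by_cases h2 : "micro" ∈ allowed <;>
        rcases hq with rfl | rfl | rfl <;>
        simp_all [pvRank?, pvLevels]

-- ===== VERDICT (by name: the statement is the Claim_ definition above) =====
theorem resolve_fidelity_py_spec : Claim_equal_resolve_fidelity_py := by
  intro requested allowed policy_context _
  unfold Spec_resolve_fidelity_py resolve_fidelity_py resolve_fidelity_py_alt pvFidelityRequested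
  simp only []
  set tok := PySem.Str.strip requested with htok
  set cap := PySem.Str.strip ((PySem.Dict.ofList (policy_context.getD [])).getD "max_control_fidelity" "") with hcap
  set req := if (pvRank? tok).isSome then tok else "meso" with hreq
  have hq : req = "macro" ∨ req = "meso" ∨ req = "micro" := by
    rw [hreq]; split
    · exact (pvRank?_isSome_iff tok).mp ‹_›
    · right; left; rfl
  by_cases hc : (pvRank? cap).isSome ∧ (pvRank? cap).getD 0 < (pvRank? req).getD 0
  · simp only [if_pos hc]
    exact pv_tail_eq cap allowed ["downgrade.budget_insufficient"] ((pvRank?_isSome_iff cap).mp hc.1)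
  · simp only [if_neg hc]
    exact pv_tail_eq req allowed [] hq
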